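-- pv_equiv track=rewrite | github.com/0evilsoul/BBsubtitle | main.py | select_by_priority
-- ===== SOURCE A (Python) =====
-- from typing import List, Dict, Any, Tuple
--
-- def categorize_language(lan_key: str) -> str:
--     l = (lan_key or "").lower()
--     if l.startswith("ai-en") or l == "en" or l.startswith("en-"):
--         return "en"
--     if l.startswith("ai-zh") or l == "zh" or l.startswith("zh-"):
--         return "zh"
--     return "other"
--
-- def select_by_priority(subs: List[Dict[str, Any]], priority: List[str]) -> Tuple[List[Dict[str, Any]], str]:
--     buckets: Dict[str, List[Dict[str, Any]]] = {"en": [], "zh": [], "other": []}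
--     for it in subs:
--         buckets[categorize_language(it.get("lan", ""))].append(it)
--     for p in priority:
--         if buckets.get(p):
--             return buckets[p], p
--     return [], ""
-- ===== SOURCE B (Python) =====
-- from typing import List, Dict, Any, Tuple
--
-- def categorize_language(lan_key: str) -> str:
--     l = (lan_key or "").lower()
--     if l.startswith("ai-en") or l == "en" or l.startswith("en-"):
--         return "en"
--     if l.startswith("ai-zh") or l == "zh" or l.startswith("zh-"):
--         return "zh"
--     return "other"
--
-- def select_by_priority(subs: List[Dict[str, Any]], priority: List[str]) -> Tuple[List[Dict[str, Any]], str]: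
--     cats = [categorize_language(it.get("lan", "")) for it in subs]
--     catset = set(cats)
--     for p in priority:
--         if p in catset:
--             return [it for it, c in zip(subs, cats) if c == p], p
--     return [], ""
-- ===== Notes on version B (the rewrite author's own statement) =====
-- stated objective: alternative
-- what changed: Drops the buckets dict: B precomputes the per-item category list once plus a set of the categories present, then walks priority returning at the first present category the order-preserving filter of subs for it (one pass over subs, one over priority, no grouping index).
import Mathlib
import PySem

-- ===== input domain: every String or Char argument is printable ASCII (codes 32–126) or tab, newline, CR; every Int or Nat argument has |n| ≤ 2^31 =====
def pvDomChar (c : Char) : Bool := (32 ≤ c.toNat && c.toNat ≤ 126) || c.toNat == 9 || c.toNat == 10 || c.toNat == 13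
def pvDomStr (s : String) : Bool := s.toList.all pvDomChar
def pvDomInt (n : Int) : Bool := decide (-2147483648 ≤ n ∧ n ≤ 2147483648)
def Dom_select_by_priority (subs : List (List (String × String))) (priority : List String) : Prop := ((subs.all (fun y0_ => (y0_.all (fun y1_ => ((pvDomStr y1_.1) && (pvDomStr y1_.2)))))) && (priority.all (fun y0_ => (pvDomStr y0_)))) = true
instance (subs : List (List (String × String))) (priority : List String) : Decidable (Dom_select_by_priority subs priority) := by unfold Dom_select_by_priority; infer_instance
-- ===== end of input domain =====

-- B drops A's buckets dict: it scans subs once per priority entry, returning the first non-empty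
-- collection (objective: simpler; return values are proved identical on all inputs).

-- ===== PORT A =====
-- shared helper (verbatim identical in Source A and Source B): categorize_language
def categorize_language (lan_key : String) : String :=
  let l := PySem.Str.lower lan_key      -- (lan_key or "").lower() = lan_key.lower() on strings
  if PySem.Str.startswith l "ai-en" || l == "en" || PySem.Str.startswith l "en-" then "en"
  else if PySem.Str.startswith l "ai-zh" || l == "zh" || PySem.Str.startswith l "zh-" then "zh"
  else "other"

-- for it in subs: buckets[categorize_language(it.get("lan",""))].append(it)
def pvBuckets (subs : List (List (String × String))) :
    PySem.Dict String (List (List (String × String))) :=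
  subs.foldl
    (fun d it => d.modify (categorize_language ((PySem.Dict.mk it).getD "lan" "")) [] (· ++ [it]))
    (PySem.Dict.mk [("en", []), ("zh", []), ("other", [])])

-- for p in priority: if buckets.get(p): return buckets[p], p
def pvLoopA (buckets : PySem.Dict String (List (List (String × String)))) :
    List String → (List (List (String × String))) × String
  | [] => ([], "")
  | p :: rest =>
    match buckets.get? p with
    | some b => if b ≠ [] then (b, p) else pvLoopA buckets rest
    | none => pvLoopA buckets rest

def select_by_priority (subs : List (List (String × String))) (priority : List String) : (List (List (String × String))) × String :=
  pvLoopA (pvBuckets subs) priority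

-- ===== PORT B =====
-- cats = [categorize_language(it.get("lan","")) for it in subs]; catset = set(cats)
-- for p in priority: if p in catset: return [it for it,c in zip(subs,cats) if c == p], p
def pvLoopB (subs : List (List (String × String))) (cats : List String)
    (catset : PySem.Set String) : List String → (List (List (String × String))) × String
  | [] => ([], "")
  | p :: rest =>
    if PySem.Set.contains catset p then
      (((subs.zip cats).filter (fun x => x.2 == p)).map (·.1), p)
    else pvLoopB subs cats catset rest

def select_by_priority_alt (subs : List (List (String × String))) (priority : List String) : (List (List (String × String))) × String :=
  let cats := subs.map (fun it => categorize_language ((PySem.Dict.mk it).getD "lan" ""))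
  let catset := PySem.Set.ofList cats
  pvLoopB subs cats catset priority

-- ===== PRECONDITION & SPEC =====
def Spec_select_by_priority (subs : List (List (String × String))) (priority : List String) (out : (List (List (String × String))) × String) : Prop := out = select_by_priority_alt subs priority
instance (subs : List (List (String × String))) (priority : List String) (out : (List (List (String × String))) × String) : Decidable (Spec_select_by_priority subs priority out) := by unfold Spec_select_by_priority; infer_instance

-- ===== CLAIM (what is proved, stated in full; the proofs are below) =====
def Claim_equal_select_by_priority : Prop := ∀ (subs : List (List (String × String))) (priority : List String), Dom_select_by_priority subs priority → Spec_select_by_priority subs priority (select_by_priority subs priority)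

-- ===== LEMMAS AND PROOFS =====

-- categorize_language only ever returns "en", "zh" or "other"
theorem categorize_mem (s : String) :
    categorize_language s = "en" ∨ categorize_language s = "zh" ∨ categorize_language s = "other" := by
  simp only [categorize_language]
  split_ifs <;> simp

-- the key of each subtitle
def pvKeyOf (it : List (String × String)) : String :=
  categorize_language ((PySem.Dict.mk it).getD "lan" "")

theorem pvBuckets_getD (subs : List (List (String × String))) (c : String) :
    (pvBuckets subs).getD c [] = subs.filter (fun it => pvKeyOf it == c) := by
  unfold pvBuckets
  have hmap : subs.foldl
        (fun d it => d.modify (categorize_language ((PySem.Dict.mk it).getD "lan" "")) [] (· ++ [it]))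
        (PySem.Dict.mk [("en", []), ("zh", []), ("other", [])])
      = (subs.map (fun it => (pvKeyOf it, it))).foldl
        (fun d (p : String × List (String × String)) => d.modify p.1 [] (· ++ [p.2]))
        (PySem.Dict.mk [("en", []), ("zh", []), ("other", [])]) := by
    rw [List.foldl_map]
    rfl
  rw [hmap, PySem.Dict.getD_foldl_modify_append]
  simp only [List.filter_map, List.map_map, Function.comp_def, List.map_id']
  have hbase : (PySem.Dict.mk ([("en", []), ("zh", []), ("other", [])] :
      List (String × List (List (String × String))))).getD c [] = [] := by
    simp only [PySem.Dict.getD, PySem.Dict.get?, List.find?]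
    cases h1 : (("en" : String) == c) <;> cases h2 : (("zh" : String) == c) <;>
      cases h3 : (("other" : String) == c) <;> simp
  rw [hbase]
  simp

theorem pvBuckets_keys (subs : List (List (String × String))) :
    (pvBuckets subs).keys = ["en", "zh", "other"] := by
  unfold pvBuckets
  rw [PySem.Dict.keys_foldl_modify_key]
  rw [PySem.Set.update_eq_append_filter]
  have h : (PySem.Set.ofList (subs.map (fun it => categorize_language ((PySem.Dict.mk it).getD "lan" "")))).filter
      (fun y => !(PySem.Set.contains ((PySem.Dict.mk ([("en", []), ("zh", []), ("other", [])] : List (String × List (List (String × String))))).keys) y)) = [] := by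
    rw [List.filter_eq_nil_iff]
    intro y hy
    rw [PySem.Set.mem_ofList] at hy
    simp only [List.mem_map] at hy
    obtain ⟨it, _, hit⟩ := hy
    rcases categorize_mem ((PySem.Dict.mk it).getD "lan" "") with hk | hk | hk <;>
      simp [← hit, hk, PySem.Set.contains, PySem.Dict.keys]
  rw [h]
  rfl

theorem pvBuckets_get? (subs : List (List (String × String))) (p : String) :
    (pvBuckets subs).get? p =
      if p = "en" ∨ p = "zh" ∨ p = "other"
      then some (subs.filter (fun it => pvKeyOf it == p)) else none := by
  by_cases hp : p = "en" ∨ p = "zh" ∨ p = "other"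
  · rw [if_pos hp]
    have hmem : p ∈ (pvBuckets subs).keys := by
      rw [pvBuckets_keys]; rcases hp with h | h | h <;> simp [h]
    cases hv : (pvBuckets subs).get? p with
    | none =>
      exact absurd ((PySem.Dict.get?_eq_none_iff_not_mem_keys _ _).mp hv) (by simpa using hmem)
    | some v =>
      have h := pvBuckets_getD subs p
      rw [PySem.Dict.getD_eq_get?_getD, hv] at h
      simp only [Option.getD_some] at h
      rw [h]
  · rw [if_neg hp, PySem.Dict.get?_eq_none_iff_not_mem_keys, pvBuckets_keys]
    simp only [List.mem_cons, List.not_mem_nil]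
    tauto

-- zip-with-its-own-map filter/map collapses to a plain filter
theorem zip_map_filter (subs : List (List (String × String))) (p : String) :
    ((subs.zip (subs.map pvKeyOf)).filter (fun x => x.2 == p)).map (·.1)
      = subs.filter (fun it => pvKeyOf it == p) := by
  induction subs with
  | nil => rfl
  | cons it rest ih =>
    simp only [List.map_cons, List.zip_cons_cons, List.filter_cons]
    by_cases h : pvKeyOf it = p <;> simp [h, ih]

-- membership of p among the categories present ↔ the filter for p is non-empty
theorem mem_cats_iff (subs : List (List (String × String))) (p : String) :
    p ∈ subs.map pvKeyOf ↔ subs.filter (fun it => pvKeyOf it == p) ≠ [] := by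
  simp only [Ne, List.filter_eq_nil_iff, beq_iff_eq, List.mem_map]
  push Not
  constructor
  · rintro ⟨it, hin, hit⟩; exact ⟨it, hin, hit⟩
  · rintro ⟨it, hin, hit⟩; exact ⟨it, hin, hit⟩

theorem loops_eq (subs : List (List (String × String))) (priority : List String) :
    pvLoopA (pvBuckets subs) priority
      = pvLoopB subs (subs.map pvKeyOf) (PySem.Set.ofList (subs.map pvKeyOf)) priority := by
  induction priority with
  | nil => rfl
  | cons p rest ih =>
    simp only [pvLoopA, pvLoopB, pvBuckets_get?]
    by_cases hmem : p ∈ subs.map pvKeyOf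
    · have hp : p = "en" ∨ p = "zh" ∨ p = "other" := by
        obtain ⟨it, _, hit⟩ := List.mem_map.mp hmem
        rcases categorize_mem ((PySem.Dict.mk it).getD "lan" "") with hk | hk | hk <;>
          rw [← hit] <;> simp [pvKeyOf, hk]
      have hne := (mem_cats_iff subs p).mp hmem
      have hcont : PySem.Set.contains (PySem.Set.ofList (subs.map pvKeyOf)) p = true := by
        rw [PySem.Set.contains_iff, PySem.Set.mem_ofList]; exact hmem
      rw [if_pos hp, hcont]
      simp [hne, zip_map_filter]
    · have hnil : subs.filter (fun it => pvKeyOf it == p) = [] := by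
        by_contra h; exact hmem ((mem_cats_iff subs p).mpr h)
      have hcont : PySem.Set.contains (PySem.Set.ofList (subs.map pvKeyOf)) p = false := by
        rw [Bool.eq_false_iff, Ne, PySem.Set.contains_iff, PySem.Set.mem_ofList]; exact hmem
      rw [hcont]
      by_cases hp : p = "en" ∨ p = "zh" ∨ p = "other"
      · rw [if_pos hp]; simp [hnil, ih]
      · rw [if_neg hp]; simp [ih]

-- ===== VERDICT (by name: the statement is the Claim_ definition above) =====
theorem select_by_priority_spec : Claim_equal_select_by_priority := by
  intro subs priority _
  unfold Spec_select_by_priority select_by_priority select_by_priority_alt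
  exact loops_eq subs priority
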